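-- pv_equiv track=rewrite | github.com/alsoncahyadi/absa_ml | main.py | _get_aspects_from_tokens
-- ===== SOURCE A (Python) =====
-- def _get_aspects_from_tokens(tokens, labels):
--     result = []
--     indices = [i for i, x in enumerate(labels) if x == "ASPECT-B"]
--     for i in indices:
--         aspect = tokens[i]
--         j = i + 1
--         while j < len(tokens):
--             if labels[j] == "ASPECT-I":
--                 aspect += " " + tokens[j]
--                 j += 1
--             else:
--                 break
--         result.append(aspect)
--     return result
-- ===== SOURCE B (Python) =====
-- def _get_aspects_from_tokens(tokens, labels):
--     result = []
--     current = None
--     for token, label in zip(tokens, labels):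
--         if label == "ASPECT-B":
--             if current is not None:
--                 result.append(current)
--             current = token
--         elif label == "ASPECT-I":
--             if current is not None:
--                 current = current + " " + token
--         else:
--             if current is not None:
--                 result.append(current)
--             current = None
--     if current is not None:
--         result.append(current)
--     return result
-- ===== Notes on version B (the rewrite author's own statement) =====
-- stated objective: simpler
-- what changed: Replaced A's two-phase scan (collect all ASPECT-B indices first, then for each one run an inner while-loop re-indexing both lists) by a single left-to-right pass over zip(tokens, labels) that maintains one in-progress phrase.
import Mathlib
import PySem

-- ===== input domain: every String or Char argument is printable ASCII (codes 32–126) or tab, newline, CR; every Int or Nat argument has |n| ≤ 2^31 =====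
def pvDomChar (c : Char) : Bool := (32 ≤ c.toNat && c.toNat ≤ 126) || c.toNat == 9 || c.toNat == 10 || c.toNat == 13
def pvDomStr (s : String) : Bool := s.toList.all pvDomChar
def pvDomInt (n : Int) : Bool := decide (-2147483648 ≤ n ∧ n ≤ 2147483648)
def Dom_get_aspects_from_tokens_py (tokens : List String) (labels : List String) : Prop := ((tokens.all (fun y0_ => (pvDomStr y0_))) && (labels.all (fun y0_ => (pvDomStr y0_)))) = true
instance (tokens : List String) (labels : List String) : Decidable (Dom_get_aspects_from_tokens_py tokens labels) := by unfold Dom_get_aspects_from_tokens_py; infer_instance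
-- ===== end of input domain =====

-- B replaces A's two-phase scan (collect ASPECT-B indices, then an inner while-loop from each)
-- by a single pass over zip(tokens, labels) carrying one in-progress phrase; objective: simpler.


-- ===== PORT A =====
-- the inner while-loop: 'while j < len(tokens): if labels[j] == "ASPECT-I": aspect += " " + tokens[j]; j += 1 else: break'
-- labels[j] is read via pyGetD; the case j ≥ len(labels) (Python IndexError) is excluded by Pre_.
def pyAspectLoop (tokens labels : List String) (j : Int) (aspect : String) : String :=
  if _h : j < (tokens.length : Int) then
    if PySem.List.pyGetD labels j "" == "ASPECT-I" then
      pyAspectLoop tokens labels (j + 1) (aspect ++ " " ++ PySem.List.pyGetD tokens j "")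
    else aspect
  else aspect
termination_by ((tokens.length : Int) - j).toNat
decreasing_by omega

def get_aspects_from_tokens_py (tokens : List String) (labels : List String) : List String :=
  -- indices = [i for i, x in enumerate(labels) if x == "ASPECT-B"]
  let indices := ((PySem.List.enumerate labels).filter (fun p => p.2 == "ASPECT-B")).map (fun p => p.1)
  -- tokens[i] via pyGetD; i ≥ len(tokens) (Python IndexError) is excluded by Pre_.
  indices.foldl
    (fun result i => result ++ [pyAspectLoop tokens labels (i + 1) (PySem.List.pyGetD tokens i "")]) []

-- ===== PORT B =====
def pyAltStep (acc : List String × Option String) (p : String × String) : List String × Option String :=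
  if p.2 == "ASPECT-B" then
    ((match acc.2 with | some c => acc.1 ++ [c] | none => acc.1), some p.1)
  else if p.2 == "ASPECT-I" then
    (acc.1, (match acc.2 with | some c => some (c ++ " " ++ p.1) | none => none))
  else
    ((match acc.2 with | some c => acc.1 ++ [c] | none => acc.1), none)

def get_aspects_from_tokens_py_alt (tokens : List String) (labels : List String) : List String :=
  let st := (tokens.zip labels).foldl pyAltStep ([], none)
  match st.2 with | some c => st.1 ++ [c] | none => st.1

-- ===== PRECONDITION & SPEC =====
-- Pre_ excludes exactly the inputs where Python A raises IndexError: an "ASPECT-B" at an index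
-- ≥ len(tokens) (reached as tokens[i]), or, when labels is shorter than tokens, an "ASPECT-B"
-- whose run of "ASPECT-I" labels reaches the end of labels (reached as labels[j]).
def Pre_get_aspects_from_tokens_py (tokens : List String) (labels : List String) : Prop :=
  (tokens.length < labels.length → "ASPECT-B" ∉ labels.drop tokens.length) ∧
  (labels.length < tokens.length →
    ∀ i, i < labels.length → labels.getD i "" = "ASPECT-B" →
      ∃ k, k < labels.length ∧ i < k ∧ labels.getD k "" ≠ "ASPECT-I")
instance (tokens : List String) (labels : List String) : Decidable (Pre_get_aspects_from_tokens_py tokens labels) := by unfold Pre_get_aspects_from_tokens_py; infer_instance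

def pvWitness_get_aspects_from_tokens_py : List String × List String :=
  (["a", "b"], ["ASPECT-B", "ASPECT-I"])

def Spec_get_aspects_from_tokens_py (tokens : List String) (labels : List String) (out : List String) : Prop := out = get_aspects_from_tokens_py_alt tokens labels
instance (tokens : List String) (labels : List String) (out : List String) : Decidable (Spec_get_aspects_from_tokens_py tokens labels out) := by unfold Spec_get_aspects_from_tokens_py; infer_instance

-- ===== CLAIM (what is proved, stated in full; the proofs are below) =====
def Claim_equal_get_aspects_from_tokens_py : Prop := ∀ (tokens : List String) (labels : List String), Dom_get_aspects_from_tokens_py tokens labels → Pre_get_aspects_from_tokens_py tokens labels → Spec_get_aspects_from_tokens_py tokens labels (get_aspects_from_tokens_py tokens labels)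


-- ===== LEMMAS AND PROOFS =====

-- the B-indices of labels (port A's 'indices' list)
def pvBidx (ls : List String) : List Int :=
  ((PySem.List.enumerate ls).filter (fun p => p.2 == "ASPECT-B")).map (fun p => p.1)

-- recursive characterisation of B's fold, parametrised by the pending phrase
def pvGRun : Option String → List (String × String) → List String
  | some c, [] => [c]
  | none, [] => []
  | cur, (t, l) :: L =>
    if l == "ASPECT-B" then
      (match cur with | some c => c :: pvGRun (some t) L | none => pvGRun (some t) L)
    else if l == "ASPECT-I" then
      pvGRun (match cur with | some c => some (c ++ " " ++ t) | none => none) L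
    else
      (match cur with | some c => c :: pvGRun none L | none => pvGRun none L)

theorem pvFoldl_app {α : Type} (f : α → String) (l : List α) (r : List String) :
    l.foldl (fun res i => res ++ [f i]) r = r ++ l.map f := by
  induction l generalizing r with
  | nil => simp
  | cons x xs ih => simp [List.foldl_cons, ih]

theorem pvEnum_shift {α : Type} (xs : List α) (s : Int) :
    PySem.List.enumerate xs (s + 1) = (PySem.List.enumerate xs s).map (fun p => (p.1 + 1, p.2)) := by
  induction xs generalizing s with
  | nil => simp [PySem.List.enumerate_nil]
  | cons x xs ih =>
    rw [PySem.List.enumerate_cons, PySem.List.enumerate_cons, List.map_cons, ← ih]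

theorem pvBidx_cons (l : String) (ls : List String) :
    pvBidx (l :: ls) =
      (if l == "ASPECT-B" then [(0 : Int)] else []) ++ (pvBidx ls).map (· + 1) := by
  unfold pvBidx
  rw [PySem.List.enumerate_cons, pvEnum_shift]
  by_cases h : l == "ASPECT-B" <;>
    simp [h, List.filter_map, Function.comp_def]

theorem pvBidx_nonneg (ls : List String) : ∀ i ∈ pvBidx ls, 0 ≤ i := by
  induction ls with
  | nil => simp [pvBidx, PySem.List.enumerate_nil]
  | cons l ls ih =>
    intro i hi
    rw [pvBidx_cons] at hi
    rcases List.mem_append.1 hi with h | h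
    · by_cases hb : l == "ASPECT-B" <;> simp [hb] at h; omega
    · obtain ⟨j, hj, rfl⟩ := List.mem_map.1 h
      have := ih j hj; omega

theorem pvBidx_nil_of_not_mem (ls : List String) (h : "ASPECT-B" ∉ ls) : pvBidx ls = [] := by
  induction ls with
  | nil => simp [pvBidx, PySem.List.enumerate_nil]
  | cons l ls ih =>
    rw [pvBidx_cons]
    have h1 : l ≠ "ASPECT-B" := fun hl => h (by simp [hl])
    have h2 : "ASPECT-B" ∉ ls := fun hl => h (by simp [hl])
    simp [h1, ih h2]

theorem pvGetD_cons_succ (x : String) (xs : List String) (i : Int) (d : String) (h : 0 ≤ i) :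
    PySem.List.pyGetD (x :: xs) (i + 1) d = PySem.List.pyGetD xs i d := by
  obtain ⟨k, rfl⟩ := Int.eq_ofNat_of_zero_le h
  rw [show ((k : Int) + 1 = ((k + 1 : Nat) : Int)) by push_cast; ring]
  rw [PySem.List.pyGetD_natCast, PySem.List.pyGetD_natCast]
  simp

theorem pvLoop_stop (ts ls : List String) (j : Int) (a : String) (h : ¬ j < (ts.length : Int)) :
    pyAspectLoop ts ls j a = a := by
  rw [pyAspectLoop, dif_neg h]

theorem pvLoop_shift (t l : String) (ts ls : List String) :
    ∀ j a, 0 ≤ j → pyAspectLoop (t :: ts) (l :: ls) (j + 1) a = pyAspectLoop ts ls j a := by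
  have key : ∀ n : Nat, ∀ j a, 0 ≤ j → ts.length - j.toNat ≤ n →
      pyAspectLoop (t :: ts) (l :: ls) (j + 1) a = pyAspectLoop ts ls j a := by
    intro n
    induction n with
    | zero =>
      intro j a hj hn
      have h1 : ¬ j < (ts.length : Int) := by omega
      have h2 : ¬ j + 1 < ((t :: ts).length : Int) := by simp [List.length_cons]; omega
      rw [pvLoop_stop (t :: ts) (l :: ls) (j + 1) a h2, pvLoop_stop ts ls j a h1]
    | succ n ih =>
      intro j a hj hn
      conv_lhs => rw [pyAspectLoop]
      conv_rhs => rw [pyAspectLoop]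
      by_cases hlt : j < (ts.length : Int)
      · have h2 : j + 1 < ((t :: ts).length : Int) := by simp [List.length_cons]; omega
        rw [dif_pos hlt, dif_pos h2]
        rw [pvGetD_cons_succ l ls j "" hj, pvGetD_cons_succ t ts j "" hj]
        by_cases hI : PySem.List.pyGetD ls j "" == "ASPECT-I"
        · rw [if_pos hI, if_pos hI]
          exact ih (j + 1) _ (by omega) (by omega)
        · rw [if_neg hI, if_neg hI]
      · have h2 : ¬ j + 1 < ((t :: ts).length : Int) := by simp [List.length_cons]; omega
        rw [dif_neg hlt, dif_neg h2]
  intro j a hj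
  exact key (ts.length - j.toNat) j a hj (le_refl _)

-- B's fold with any starting state, expressed through pvGRun
theorem pvFoldl_gRun (L : List (String × String)) :
    ∀ res cur,
      (match (L.foldl pyAltStep (res, cur)).2 with
        | some c => (L.foldl pyAltStep (res, cur)).1 ++ [c]
        | none => (L.foldl pyAltStep (res, cur)).1) = res ++ pvGRun cur L := by
  induction L with
  | nil => intro res cur; cases cur <;> simp [pvGRun]
  | cons p L ih =>
    intro res cur
    obtain ⟨t, l⟩ := p
    rw [List.foldl_cons]
    by_cases hB : l == "ASPECT-B"
    · cases cur <;> simp [pyAltStep, hB, pvGRun, ih]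
    · by_cases hI : l == "ASPECT-I"
      · cases cur <;> simp [pyAltStep, hB, hI, pvGRun, ih]
      · cases cur <;> simp [pyAltStep, hB, hI, pvGRun, ih]

-- the weaker half of Pre_ that the port-level equality needs
def pvPreB (ts ls : List String) : Prop :=
  ts.length < ls.length → "ASPECT-B" ∉ ls.drop ts.length

theorem pvPreB_cons (t l : String) (ts ls : List String) (h : pvPreB (t :: ts) (l :: ls)) :
    pvPreB ts ls := by
  intro hlen
  have := h (by simpa using Nat.succ_lt_succ hlen)
  simpa using this

theorem pvMain (ts : List String) : ∀ ls, pvPreB ts ls →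
    ((pvBidx ls).map (fun i => pyAspectLoop ts ls (i + 1) (PySem.List.pyGetD ts i "")) =
        pvGRun none (ts.zip ls)) ∧
    (∀ a, pvGRun (some a) (ts.zip ls) =
        pyAspectLoop ts ls 0 a ::
          (pvBidx ls).map (fun i => pyAspectLoop ts ls (i + 1) (PySem.List.pyGetD ts i ""))) := by
  induction ts with
  | nil =>
    intro ls hpre
    have hB : pvBidx ls = [] := by
      cases ls with
      | nil => simp [pvBidx, PySem.List.enumerate_nil]
      | cons l ls' =>
        exact pvBidx_nil_of_not_mem _ (by simpa using hpre (by simp))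
    rw [hB]
    refine ⟨by simp [pvGRun], fun a => ?_⟩
    rw [show ([] : List String).zip ls = [] by simp, pvLoop_stop [] ls 0 a (by simp)]
    simp [pvGRun]
  | cons t ts ih =>
    intro ls hpre
    cases ls with
    | nil =>
      refine ⟨by simp [pvBidx, PySem.List.enumerate_nil, pvGRun], fun a => ?_⟩
      have hloop : pyAspectLoop (t :: ts) [] 0 a = a := by
        rw [pyAspectLoop, dif_pos (by simp), if_neg (by simp [PySem.List.pyGetD_zero])]
      simp [pvBidx, PySem.List.enumerate_nil, pvGRun, hloop]
    | cons l ls =>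
      have hpre' := pvPreB_cons t l ts ls hpre
      obtain ⟨ihS, ihU⟩ := ih ls hpre'
      -- the shifted tail phrases coincide with the tail's phrases
      have hmap :
          ((pvBidx ls).map (· + 1)).map
              (fun i => pyAspectLoop (t :: ts) (l :: ls) (i + 1) (PySem.List.pyGetD (t :: ts) i "")) =
            (pvBidx ls).map (fun i => pyAspectLoop ts ls (i + 1) (PySem.List.pyGetD ts i "")) := by
        rw [List.map_map]
        refine List.map_congr_left ?_
        intro i hi
        have hi0 : 0 ≤ i := pvBidx_nonneg ls i hi
        simp only [Function.comp]
        rw [pvGetD_cons_succ t ts i "" hi0, pvLoop_shift t l ts ls (i + 1) _ (by omega)]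
      have hzip : (t :: ts).zip (l :: ls) = (t, l) :: ts.zip ls := by simp
      by_cases hB : l == "ASPECT-B"
      · have hBeq : l = "ASPECT-B" := by simpa using hB
        have hph0 : ∀ b, pyAspectLoop (t :: ts) (l :: ls) (0 + 1) b = pyAspectLoop ts ls 0 b :=
          fun b => pvLoop_shift t l ts ls 0 b (by omega)
        have hph1 : ∀ b, pyAspectLoop (t :: ts) (l :: ls) 1 b = pyAspectLoop ts ls 0 b := by
          intro b; have := hph0 b; norm_num at this; exact this
        constructor
        · rw [pvBidx_cons, hB]
          simp only [if_true, List.map_append, hmap, List.map_cons, List.map_nil, zero_add,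
            PySem.List.pyGetD_zero_cons, hph1]
          rw [hzip]
          rw [show pvGRun none ((t, l) :: ts.zip ls) = pvGRun (some t) (ts.zip ls) by
            simp [pvGRun, hB]]
          rw [ihU t]
          simp
        · intro a
          rw [hzip]
          rw [show pvGRun (some a) ((t, l) :: ts.zip ls) = a :: pvGRun (some t) (ts.zip ls) by
            simp [pvGRun, hB]]
          rw [ihU t]
          have hstop : pyAspectLoop (t :: ts) (l :: ls) 0 a = a := by
            rw [pyAspectLoop]
            split
            · rw [if_neg (by simp [PySem.List.pyGetD_zero_cons, hBeq])]
            · rfl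
          rw [hstop, pvBidx_cons, hB]
          simp only [if_true, List.map_append, hmap, List.map_cons, List.map_nil, zero_add,
            PySem.List.pyGetD_zero_cons, hph1]
          simp
      · have hBne : ¬ l = "ASPECT-B" := by simpa using hB
        have hBfalse : (l == "ASPECT-B") = false := by simpa using hBne
        have hBidx : pvBidx (l :: ls) = (pvBidx ls).map (· + 1) := by
          rw [pvBidx_cons, hBfalse]; simp
        by_cases hI : l == "ASPECT-I"
        · have hIeq : l = "ASPECT-I" := by simpa using hI
          constructor
          · rw [hBidx, hmap, hzip]
            rw [show pvGRun none ((t, l) :: ts.zip ls) = pvGRun none (ts.zip ls) by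
              simp [pvGRun, hBfalse, hI]]
            exact ihS
          · intro a
            rw [hzip]
            rw [show pvGRun (some a) ((t, l) :: ts.zip ls) =
                pvGRun (some (a ++ " " ++ t)) (ts.zip ls) by simp [pvGRun, hBfalse, hI]]
            rw [ihU (a ++ " " ++ t)]
            have hloop : pyAspectLoop (t :: ts) (l :: ls) 0 a =
                pyAspectLoop ts ls 0 (a ++ " " ++ t) := by
              rw [pyAspectLoop]
              rw [dif_pos (by simp)]
              rw [if_pos (by simp [PySem.List.pyGetD_zero_cons, hIeq])]
              rw [pvLoop_shift t l ts ls 0 _ (by omega)]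
              simp [PySem.List.pyGetD_zero_cons]
            rw [hloop, hBidx, hmap]
        · have hIne : ¬ l = "ASPECT-I" := by simpa using hI
          have hstop : ∀ a, pyAspectLoop (t :: ts) (l :: ls) 0 a = a := by
            intro a
            rw [pyAspectLoop]
            split
            · rw [if_neg (by simp [PySem.List.pyGetD_zero_cons, hIne])]
            · rfl
          constructor
          · rw [hBidx, hmap, hzip]
            rw [show pvGRun none ((t, l) :: ts.zip ls) = pvGRun none (ts.zip ls) by
              simp [pvGRun, hBfalse, hI]]
            exact ihS
          · intro a
            rw [hzip]
            rw [show pvGRun (some a) ((t, l) :: ts.zip ls) = a :: pvGRun none (ts.zip ls) by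
              simp [pvGRun, hBfalse, hI]]
            rw [ihS.symm] at *
            rw [hstop a, hBidx, hmap, ihS]

theorem pvPortA_eq (ts ls : List String) :
    get_aspects_from_tokens_py ts ls =
      (pvBidx ls).map (fun i => pyAspectLoop ts ls (i + 1) (PySem.List.pyGetD ts i "")) := by
  unfold get_aspects_from_tokens_py pvBidx
  exact (pvFoldl_app _ _ []).trans (by simp)

theorem pvPortB_eq (ts ls : List String) :
    get_aspects_from_tokens_py_alt ts ls = pvGRun none (ts.zip ls) := by
  unfold get_aspects_from_tokens_py_alt
  have := pvFoldl_gRun (ts.zip ls) [] none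
  simpa using this

-- ===== VERDICT (by name: the statement is the Claim_ definition above) =====
theorem get_aspects_from_tokens_py_spec : Claim_equal_get_aspects_from_tokens_py := by
  intro tokens labels _ hpre
  unfold Spec_get_aspects_from_tokens_py
  rw [pvPortA_eq, pvPortB_eq]
  exact (pvMain tokens labels hpre.1).1
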